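-- pv_equiv track=rewrite | github.com/iandresnovaf/ats-preselection-platform | backend/app/integrations/linkedin.py | _get_localized_value
-- ===== SOURCE A (Python) =====
-- from typing import Any, Dict, List, Optional, Tuple
--
-- def _get_localized_value(field_data: Dict) -> str:
--     """Obtener valor localizado de un campo."""
--     if not field_data:
--         return ""
--
--     localized = field_data.get("localized", {})
--
--     # Intentar español primero
--     for key in localized:
--         if key.startswith("es"):
--             return localized[key]
--
--     # Luego inglés
--     for key in localized:
--         if key.startswith("en"):
--             return localized[key]
--
--     # Cualquier otro
--     if localized:
--         return list(localized.values())[0]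
--
--     return ""
-- ===== SOURCE B (Python) =====
-- def _get_localized_value(field_data):
--     """Obtener valor localizado de un campo (single pass with sentinels)."""
--     if not field_data:
--         return ""
--
--     localized = field_data.get("localized", {})
--
--     es_val = None
--     en_val = None
--     first_val = None
--     for key, value in localized.items():
--         if es_val is None and key.startswith("es"):
--             es_val = value
--         if en_val is None and key.startswith("en"):
--             en_val = value
--         if first_val is None:
--             first_val = value
--
--     if es_val is not None:
--         return es_val
--     if en_val is not None:
--         return en_val
--     if first_val is not None:
--         return first_val
--     return ""
-- ===== Notes on version B (the rewrite author's own statement) =====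
-- stated objective: alternative
-- what changed: Replaced A's three separate scans over localized (es-prefix scan, en-prefix scan, then list(values)[0]) by one pass over localized.items() that captures es/en/first values with None sentinels on first occurrence.
import Mathlib
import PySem

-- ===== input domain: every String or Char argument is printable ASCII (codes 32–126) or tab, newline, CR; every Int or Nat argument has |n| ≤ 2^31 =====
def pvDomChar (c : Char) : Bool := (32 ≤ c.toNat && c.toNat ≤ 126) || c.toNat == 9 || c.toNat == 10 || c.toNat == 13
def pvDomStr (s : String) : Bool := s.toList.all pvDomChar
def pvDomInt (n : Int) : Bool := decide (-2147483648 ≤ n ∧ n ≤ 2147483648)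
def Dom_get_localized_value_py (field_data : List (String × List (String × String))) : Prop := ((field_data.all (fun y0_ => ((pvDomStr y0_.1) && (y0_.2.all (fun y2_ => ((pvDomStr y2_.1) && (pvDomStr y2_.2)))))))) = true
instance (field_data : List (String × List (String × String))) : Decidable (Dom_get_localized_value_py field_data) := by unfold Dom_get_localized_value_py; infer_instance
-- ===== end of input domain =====

-- B replaces A's three separate scans over localized by one pass with None sentinels; alternative decomposition, same cost.

-- ===== PORT A =====
-- 'for key in localized: if key.startswith(p): return localized[key]' — over a dict's items the
-- looked-up value is the paired value (keys are unique), so the scan returns the first matching pair's value.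
def pvScanPrefix (pre : String) : List (String × String) → Option String
  | [] => none
  | (k, v) :: rest => if PySem.Str.startswith k pre then some v else pvScanPrefix pre rest

def get_localized_value_py (field_data : List (String × List (String × String))) : String :=
  let d := PySem.Dict.ofList field_data
  if d.size = 0 then ""
  else
    let localized := PySem.Dict.ofList (d.getD "localized" [])
    match pvScanPrefix "es" localized.items with
    | some v => v
    | none =>
      match pvScanPrefix "en" localized.items with
      | some v => v
      | none =>
        match localized.items with        -- if localized: return list(localized.values())[0]
        | (_, v) :: _ => v
        | [] => ""

-- ===== PORT B =====
def pvStep (s : Option String × Option String × Option String) (p : String × String) :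
    Option String × Option String × Option String :=
  (if s.1.isNone && PySem.Str.startswith p.1 "es" then some p.2 else s.1,
   if s.2.1.isNone && PySem.Str.startswith p.1 "en" then some p.2 else s.2.1,
   if s.2.2.isNone then some p.2 else s.2.2)

def get_localized_value_py_alt (field_data : List (String × List (String × String))) : String :=
  let d := PySem.Dict.ofList field_data
  if d.size = 0 then ""
  else
    let localized := PySem.Dict.ofList (d.getD "localized" [])
    let r := localized.items.foldl pvStep (none, none, none)
    match r.1 with
    | some v => v
    | none =>
      match r.2.1 with
      | some v => v
      | none =>
        match r.2.2 with
        | some v => v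
        | none => ""

-- ===== PRECONDITION & SPEC =====
def Spec_get_localized_value_py (field_data : List (String × List (String × String))) (out : String) : Prop := out = get_localized_value_py_alt field_data
instance (field_data : List (String × List (String × String))) (out : String) : Decidable (Spec_get_localized_value_py field_data out) := by unfold Spec_get_localized_value_py; infer_instance

-- ===== CLAIM (what is proved, stated in full; the proofs are below) =====
def Claim_equal_get_localized_value_py : Prop := ∀ (field_data : List (String × List (String × String))), Dom_get_localized_value_py field_data → Spec_get_localized_value_py field_data (get_localized_value_py field_data)

-- ===== LEMMAS AND PROOFS =====

-- invariant of B's single pass: the fold computes A's three scan results, each shadowed by an already-captured sentinel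
lemma pvFold_inv (l : List (String × String)) (e n f : Option String) :
    l.foldl pvStep (e, n, f) =
      (e.or (pvScanPrefix "es" l), n.or (pvScanPrefix "en" l), f.or (l.head?.map (·.2))) := by
  induction l generalizing e n f with
  | nil => cases e <;> cases n <;> cases f <;> simp [pvScanPrefix]
  | cons p t ih =>
    obtain ⟨k, v⟩ := p
    simp only [List.foldl_cons, pvStep, ih, pvScanPrefix]
    cases e <;> cases n <;> cases f <;> split_ifs <;> simp_all

theorem get_localized_value_py_spec_aux (field_data : List (String × List (String × String))) :
    get_localized_value_py field_data = get_localized_value_py_alt field_data := by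
  unfold get_localized_value_py get_localized_value_py_alt
  by_cases h : (PySem.Dict.ofList field_data).size = 0
  · simp [h]
  · simp only [h, if_false]
    rw [pvFold_inv]
    simp only [Option.or]
    cases hes : pvScanPrefix "es" (PySem.Dict.ofList ((PySem.Dict.ofList field_data).getD "localized" [])).items with
    | some v => simp
    | none =>
      cases hen : pvScanPrefix "en" (PySem.Dict.ofList ((PySem.Dict.ofList field_data).getD "localized" [])).items with
      | some v => simp
      | none =>
        cases hit : (PySem.Dict.ofList ((PySem.Dict.ofList field_data).getD "localized" [])).items with
        | nil => simp
        | cons p t => obtain ⟨k, v⟩ := p; simp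

-- ===== VERDICT (by name: the statement is the Claim_ definition above) =====
theorem get_localized_value_py_spec : Claim_equal_get_localized_value_py := by
  intro fd _
  unfold Spec_get_localized_value_py
  exact get_localized_value_py_spec_aux fd
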